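-- pv_equiv track=rewrite | github.com/Tosaaaki/QuantRabbit | scripts/resync_trades_from_oanda.py | apply_rows
-- ===== SOURCE A (Python) =====
-- from typing import Any, Dict, Iterable, List, Tuple
--
-- def apply_rows(rows: List[Dict[str, Any]]) -> List[Dict[str, Any]]:
--     by_ticket: Dict[str, Dict[str, Any]] = {}
--     for row in rows:
--         ticket = row.get("ticket_id")
--         if not ticket:
--             continue
--         by_ticket[ticket] = row
--     return list(by_ticket.values())
-- ===== SOURCE B (Python) =====
-- from typing import Any, Dict, List
--
--
-- def apply_rows(rows: List[Dict[str, Any]]) -> List[Dict[str, Any]]: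
--     # pass 1: last value for each ticket (order irrelevant)
--     last: Dict[str, Dict[str, Any]] = {}
--     for row in rows:
--         ticket = row.get("ticket_id")
--         if ticket:
--             last[ticket] = row
--     # pass 2: emit in first-appearance order, one row per ticket
--     out: List[Dict[str, Any]] = []
--     emitted = set()
--     for row in rows:
--         ticket = row.get("ticket_id")
--         if not ticket or ticket in emitted:
--             continue
--         emitted.add(ticket)
--         out.append(last[ticket])
--     return out
-- ===== Notes on version B (the rewrite author's own statement) =====
-- stated objective: alternative
-- what changed: Replaces the single dict-overwrite pass (whose output order relies on dict reassignment keeping insertion position) with two explicit passes: a last-value index built first, then a second scan over the rows with an emitted set that appends last[ticket] at each ticket's first appearance.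
import Mathlib
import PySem

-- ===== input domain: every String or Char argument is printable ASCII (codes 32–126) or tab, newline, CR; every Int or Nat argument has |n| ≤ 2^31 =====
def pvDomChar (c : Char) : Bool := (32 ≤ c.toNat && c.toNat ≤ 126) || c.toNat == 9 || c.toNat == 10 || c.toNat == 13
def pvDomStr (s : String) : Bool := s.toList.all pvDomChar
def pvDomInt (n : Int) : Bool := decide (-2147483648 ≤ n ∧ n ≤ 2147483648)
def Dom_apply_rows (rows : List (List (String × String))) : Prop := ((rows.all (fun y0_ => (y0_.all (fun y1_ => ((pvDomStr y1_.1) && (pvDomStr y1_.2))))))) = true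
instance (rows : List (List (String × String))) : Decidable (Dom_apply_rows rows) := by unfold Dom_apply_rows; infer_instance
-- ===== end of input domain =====

-- B replaces A's single dict-overwrite pass by a last-value index plus a second scan with an
-- emitted set (alternative decomposition, same cost; return value only — neither mutates input).

-- ===== PORT A =====
-- row.get("ticket_id"): first-match lookup in the association list (Python dict has unique keys)
def pvTicket (row : List (String × String)) : Option String :=
  (PySem.Dict.mk row).get? "ticket_id"

def apply_rows (rows : List (List (String × String))) : List (List (String × String)) :=
  (rows.foldl (fun d row =>
      match pvTicket row with
      | none => d
      | some t => if t = "" then d else d.insert t row)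
    PySem.Dict.empty).values

-- ===== PORT B =====
-- B's pass 1: the last row stored for each (truthy) ticket
def pvLastIndex (rows : List (List (String × String))) :
    PySem.Dict String (List (String × String)) :=
  rows.foldl (fun d row =>
      match pvTicket row with
      | none => d
      | some t => if t = "" then d else d.insert t row)
    PySem.Dict.empty

def apply_rows_alt (rows : List (List (String × String))) : List (List (String × String)) :=
  (rows.foldl (fun (acc : List (List (String × String)) × PySem.Set String) row =>
      match pvTicket row with
      | none => acc
      | some t =>
        if t = "" then acc
        else if PySem.Set.contains acc.2 t then acc
        else (acc.1 ++ [match (pvLastIndex rows).get? t with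
                        | some v => v
                        | none => []],   -- KeyError branch of last[ticket]: unreachable, t was stored in pass 1
              PySem.Set.add acc.2 t))
    ([], PySem.Set.empty)).1

-- ===== PRECONDITION & SPEC =====
def Spec_apply_rows (rows : List (List (String × String))) (out : List (List (String × String))) : Prop := out = apply_rows_alt rows
instance (rows : List (List (String × String))) (out : List (List (String × String))) : Decidable (Spec_apply_rows rows out) := by unfold Spec_apply_rows; infer_instance

-- ===== CLAIM (what is proved, stated in full; the proofs are below) =====
def Claim_equal_apply_rows : Prop := ∀ (rows : List (List (String × String))), Dom_apply_rows rows → Spec_apply_rows rows (apply_rows rows)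

-- ===== LEMMAS AND PROOFS =====

-- the (ticket, row) pairs both programs actually process, in order
def pvPairs : List (List (String × String)) → List (String × List (String × String))
  | [] => []
  | row :: rest =>
    match pvTicket row with
    | none => pvPairs rest
    | some t => if t = "" then pvPairs rest else (t, row) :: pvPairs rest

-- A's fold (= B's pass 1) over rows is the plain insert fold over pvPairs
theorem pv_foldA_eq (rows : List (List (String × String)))
    (d : PySem.Dict String (List (String × String))) :
    rows.foldl (fun d row =>
      match pvTicket row with
      | none => d
      | some t => if t = "" then d else d.insert t row) d
    = (pvPairs rows).foldl (fun d p => d.insert p.1 p.2) d := by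
  induction rows generalizing d with
  | nil => rfl
  | cons row rest ih =>
    simp only [List.foldl_cons, pvPairs]
    cases h : pvTicket row with
    | none => exact ih d
    | some t =>
      by_cases ht : t = ""
      · simpa [ht] using ih d
      · simpa [ht] using ih (d.insert t row)

-- B's pass 2 over rows is the dedup fold over pvPairs
theorem pv_foldB_eq (rows : List (List (String × String)))
    (L : PySem.Dict String (List (String × String)))
    (acc : List (List (String × String)) × PySem.Set String) :
    rows.foldl (fun (acc : List (List (String × String)) × PySem.Set String) row =>
      match pvTicket row with
      | none => acc
      | some t =>
        if t = "" then acc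
        else if PySem.Set.contains acc.2 t then acc
        else (acc.1 ++ [match L.get? t with | some v => v | none => []],
              PySem.Set.add acc.2 t)) acc
    = (pvPairs rows).foldl (fun acc p =>
        if PySem.Set.contains acc.2 p.1 then acc
        else (acc.1 ++ [match L.get? p.1 with | some v => v | none => []],
              PySem.Set.add acc.2 p.1)) acc := by
  induction rows generalizing acc with
  | nil => rfl
  | cons row rest ih =>
    simp only [List.foldl_cons, pvPairs]
    cases h : pvTicket row with
    | none => exact ih acc
    | some t =>
      by_cases ht : t = ""
      · simpa [ht] using ih acc
      · simpa [ht] using ih _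

-- the keys pass 2 emits, in order
def pvNewKeys (s : PySem.Set String) :
    List (String × List (String × String)) → List String
  | [] => []
  | p :: ps =>
    if PySem.Set.contains s p.1 then pvNewKeys s ps
    else p.1 :: pvNewKeys (PySem.Set.add s p.1) ps

theorem pv_passB (L : PySem.Dict String (List (String × String)))
    (ps : List (String × List (String × String)))
    (out : List (List (String × String))) (s : PySem.Set String) :
    (ps.foldl (fun acc p =>
        if PySem.Set.contains acc.2 p.1 then acc
        else (acc.1 ++ [match L.get? p.1 with | some v => v | none => []],
              PySem.Set.add acc.2 p.1)) (out, s)).1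
    = out ++ (pvNewKeys s ps).map (fun k => (L.get? k).getD []) := by
  induction ps generalizing out s with
  | nil => simp [pvNewKeys]
  | cons p ps ih =>
    by_cases hm : p.1 ∈ s
    · simpa [pvNewKeys, hm] using ih out s
    · have h2 := ih (out ++ [match L.get? p.1 with | some v => v | none => []])
        (PySem.Set.add s p.1)
      cases hg : L.get? p.1 with
      | none =>
        simp [pvNewKeys, hm, hg] at h2 ⊢
        simpa [List.append_assoc] using h2
      | some v =>
        simp [pvNewKeys, hm, hg] at h2 ⊢
        simpa [List.append_assoc] using h2

-- s ++ pvNewKeys s ps is exactly Set.update s (ps.map fst)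
theorem pv_newKeys_update (ps : List (String × List (String × String)))
    (s : PySem.Set String) :
    s ++ pvNewKeys s ps = PySem.Set.update s (ps.map Prod.fst) := by
  induction ps generalizing s with
  | nil => simp [pvNewKeys, PySem.Set.update]
  | cons p ps ih =>
    by_cases hm : p.1 ∈ s
    · simp [pvNewKeys, hm, List.map_cons, PySem.Set.update_cons, ih]
    · have := ih (PySem.Set.add s p.1)
      simp [pvNewKeys, hm, List.map_cons, PySem.Set.update_cons] at this ⊢
      simpa [List.append_assoc] using this

-- ===== VERDICT (by name: the statement is the Claim_ definition above) =====
theorem apply_rows_spec : Claim_equal_apply_rows := by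
  intro rows _
  unfold Spec_apply_rows apply_rows apply_rows_alt
  rw [pv_foldA_eq, pv_foldB_eq, pv_passB]
  have hL : pvLastIndex rows
      = (pvPairs rows).foldl (fun d p => d.insert p.1 p.2) PySem.Dict.empty := by
    unfold pvLastIndex; exact pv_foldA_eq rows _
  rw [hL]
  set ps := pvPairs rows with hps
  set D := ps.foldl (fun d p => d.insert p.1 p.2) PySem.Dict.empty with hD
  have hnd : D.keys.Nodup := by
    rw [hD]
    exact PySem.Dict.nodup_keys_foldl_insert_key ps Prod.fst _ _ PySem.Dict.nodup_keys_empty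
  have hkeys : D.keys = pvNewKeys PySem.Set.empty ps := by
    rw [hD, PySem.Dict.keys_foldl_insert_key, ← pv_newKeys_update]
    simp [PySem.Dict.keys_empty, PySem.Set.empty]
  rw [PySem.Dict.values_eq_map_keys D hnd [], hkeys]
  simp [PySem.Dict.getD_eq_get?_getD]
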